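-- pv_equiv track=rewrite | github.com/HyungJunGoo/AlgorithmProblems | Programmers/lv3/kakao_table_edit.py | solution
-- ===== SOURCE A (Python) =====
-- class Node:
--     def __init__(self, n) -> None:
--         self.n = n
--         self.prev = None
--         self.next = None
--
-- def solution(n, k, cmds):
--
--     answer = ["O" for _ in range(n)]
--     _nodes = []
--     _deleted = []
--     for i in range(n):
--         _nodes.append(Node(i))
--     _nodes[0].next = _nodes[1]
--     _nodes[n - 1].prev = _nodes[n - 2]
--
--     for i in range(1, n - 1):
--         _nodes[i].prev = _nodes[i - 1]
--         _nodes[i].next = _nodes[i + 1]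
--
--     for cmd in cmds:
--         if cmd[0] == "U" or cmd[0] == "D":
--             x = int(cmd.split(" ")[1])
--             while x > 0:
--                 if cmd[0] == "U":
--
--                     k = _nodes[k].prev.n
--                 elif cmd[0] == "D":
--                     k = _nodes[k].next.n
--                 x -= 1
--
--         elif cmd[0] == "C":
--             _deleted.append(k)
--             if _nodes[k].prev is not None:  # 맨 앞 아니라면
--                 _nodes[k].prev.next = _nodes[k].next
--             if _nodes[k].next is not None:  # 맨 뒤 아니라면
--                 _nodes[k].next.prev = _nodes[k].prev
--                 k = _nodes[k].next.n
--             else:  # 맨 뒤라면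
--                 k = _nodes[k].prev.n
--
--         elif cmd[0] == "Z":
--
--             last = _deleted.pop()
--             if _nodes[last].prev is not None:
--                 _nodes[last].prev.next = _nodes[last]
--             if _nodes[last].next is not None:
--                 _nodes[last].next.prev = _nodes[last]
--     for deleted_row in _deleted:
--         answer[deleted_row] = "X"
--     return "".join(answer)
-- ===== SOURCE B (Python) =====
-- def solution(n, k, cmds):
--     deleted = set()
--     stack = []
--     for cmd in cmds:
--         if cmd[0] == "U":
--             x = int(cmd.split(" ")[1])
--             while x > 0:
--                 k -= 1
--                 if k not in deleted:
--                     x -= 1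
--         elif cmd[0] == "D":
--             x = int(cmd.split(" ")[1])
--             while x > 0:
--                 k += 1
--                 if k not in deleted:
--                     x -= 1
--         elif cmd[0] == "C":
--             stack.append(k)
--             deleted.add(k)
--             j = k + 1
--             while j < n and j in deleted:
--                 j += 1
--             if j < n:
--                 k = j
--             else:
--                 j = k - 1
--                 while j >= 0 and j in deleted:
--                     j -= 1
--                 k = j
--         elif cmd[0] == "Z":
--             deleted.discard(stack.pop())
--     return "".join("X" if i in deleted else "O" for i in range(n))
-- ===== Notes on version B (the rewrite author's own statement) =====
-- stated objective: simpler
-- what changed: Replaces A's doubly-linked list of Node objects (pointer surgery on delete/undo) by a deleted-set plus an undo-stack with an integer cursor that skips deleted rows by scanning, and renders the answer by membership instead of in-place marking.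
-- outside the precondition, e.g. on solution(3, -1, ['C']): A returns 'OOX', B returns 'OOO'; on solution(1, 0, []): A raises IndexError, B returns 'O'; on solution(4, 5, ['D 1']): A raises IndexError, B returns 'OOOO'
import Mathlib
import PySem

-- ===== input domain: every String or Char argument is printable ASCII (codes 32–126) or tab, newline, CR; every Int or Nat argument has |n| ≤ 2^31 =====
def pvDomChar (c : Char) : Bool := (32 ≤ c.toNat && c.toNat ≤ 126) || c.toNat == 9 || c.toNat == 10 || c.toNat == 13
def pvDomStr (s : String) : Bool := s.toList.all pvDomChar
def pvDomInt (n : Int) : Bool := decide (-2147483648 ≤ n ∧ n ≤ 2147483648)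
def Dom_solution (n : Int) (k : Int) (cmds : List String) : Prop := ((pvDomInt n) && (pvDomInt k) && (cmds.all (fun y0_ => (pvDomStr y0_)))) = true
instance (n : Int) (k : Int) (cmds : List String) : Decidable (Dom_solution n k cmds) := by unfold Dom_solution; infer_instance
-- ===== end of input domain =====

-- B replaces A's doubly-linked Node list by a deleted-set + undo-stack with cursor scans (simpler data structure, same observable results).

-- ===== PORT A =====
-- A's state: next/prev pointer arrays (node object identity = its index), the deleted stack, the cursor.
structure ASt where
  nxt : List (Option Int)
  prv : List (Option Int)
  del : List Int
  k : Int

-- A's `while x > 0: k = _nodes[k].prev/.next.n` (none = IndexError/AttributeError)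
def aMove (tbl : List (Option Int)) (k : Int) (x : Int) : Option Int :=
  if h : 0 < x then
    match PySem.List.pyGet? tbl k with
    | some (some k') => aMove tbl k' (x - 1)
    | _ => none
  else some k
termination_by x.toNat
decreasing_by omega

-- one iteration of A's command loop; none = a Python exception
def aStep (s : ASt) (cmd : String) : Option ASt :=
  match PySem.Str.pyGet? cmd 0 with
  | none => none                       -- cmd[0] on "": IndexError
  | some c =>
    if c = 'U' ∨ c = 'D' then
      match PySem.Str.split? cmd " " with
      | none => none
      | some parts =>
        match PySem.List.pyGet? parts 1 with
        | none => none                 -- IndexError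
        | some w =>
          match PySem.Int.ofStr? w with
          | none => none               -- ValueError
          | some x =>
            match aMove (if c = 'U' then s.prv else s.nxt) s.k x with
            | none => none             -- walked onto a None pointer / bad index
            | some k' => some ⟨s.nxt, s.prv, s.del, k'⟩
    else if c = 'C' then
      match PySem.List.pyGet? s.prv s.k, PySem.List.pyGet? s.nxt s.k with
      | some p, some nx =>
        let del' := s.del ++ [s.k]
        let nxt' := match p with
          | some p0 =>
            match PySem.List.pySet? s.nxt p0 nx with
            | some t => t
            | none => s.nxt            -- unreachable: p0 is a live index
          | none => s.nxt
        match nx with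
        | some nx0 =>
          match PySem.List.pySet? s.prv nx0 p with
          | some prv' => some ⟨nxt', prv', del', nx0⟩
          | none => none
        | none =>
          match p with
          | some p0 => some ⟨nxt', s.prv, del', p0⟩
          | none => none               -- prev is None too: AttributeError
      | _, _ => none                   -- _nodes[k]: IndexError
    else if c = 'Z' then
      match s.del.getLast? with
      | none => none                   -- pop from empty list: IndexError
      | some last =>
        let del' := s.del.dropLast
        match PySem.List.pyGet? s.prv last, PySem.List.pyGet? s.nxt last with
        | some p, some nx =>
          let nxt' := match p with
            | some p0 =>
              match PySem.List.pySet? s.nxt p0 (some last) with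
              | some t => t
              | none => s.nxt
            | none => s.nxt
          let prv' := match nx with
            | some nx0 =>
              match PySem.List.pySet? s.prv nx0 (some last) with
              | some t => t
              | none => s.prv
            | none => s.prv
          some ⟨nxt', prv', del', s.k⟩
        | _, _ => none
    else some s

def aLoop (cmds : List String) (st : Option ASt) : Option ASt :=
  cmds.foldl (fun s? c => s?.bind (fun s => aStep s c)) st

-- A's pointer initialisation (prev array, next array); requires 2 ≤ n like the Python
def aInit (n : Int) : List (Option Int) × List (Option Int) :=
  -- A's setup: all-None pointer arrays, _nodes[0].next, _nodes[n-1].prev, then the range(1, n-1) loop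
  (PySem.List.pyRange 1 (n - 1)).foldl
    (fun (s : List (Option Int) × List (Option Int)) i =>
      (PySem.List.pySetD s.1 i (some (i - 1)), PySem.List.pySetD s.2 i (some (i + 1))))
    (PySem.List.pySetD ((PySem.List.pyRange 0 n).map (fun _ => none)) (n - 1) (some (n - 2)),
     PySem.List.pySetD ((PySem.List.pyRange 0 n).map (fun _ => none)) 0 (some 1))

def solution (n : Int) (k : Int) (cmds : List String) : String :=
  -- the Python setup indexes _nodes[0], _nodes[1], _nodes[n-1], _nodes[n-2]: IndexError unless 2 ≤ n (Pre_ excludes)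
  if 2 ≤ n then
    let answer : List String := (PySem.List.pyRange 0 n).map (fun _ => "O")
    let init := aInit n
    match aLoop cmds (some ⟨init.2, init.1, [], k⟩) with
    | none => ""                       -- a Python exception mid-run; Pre_ excludes these inputs
    | some s =>
      match s.del.foldl (fun a? e => a?.bind (fun a => PySem.List.pySet? a e "X")) (some answer) with
      | none => ""                     -- answer[row] = "X" raised; Pre_ excludes
      | some a => PySem.Str.join "" a
  else ""

-- ===== PORT B =====
-- helper for the termination of B's scans
theorem pvFilterLenLt {d : List Int} {p q : Int → Bool} (hpq : ∀ a, p a = true → q a = true)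
    {x : Int} (hx : x ∈ d) (hqx : q x = true) (hpx : ¬ p x = true) :
    (d.filter p).length < (d.filter q).length := by
  have hsub := List.monotone_filter_right d hpq
  rcases Nat.lt_or_ge (d.filter p).length (d.filter q).length with h | h
  · exact h
  · exfalso
    have heq : d.filter p = d.filter q := hsub.eq_of_length (Nat.le_antisymm hsub.length_le h)
    have : x ∈ d.filter p := heq ▸ (List.mem_filter.mpr ⟨hx, hqx⟩)
    exact hpx (List.mem_filter.mp this).2

-- B's `while x > 0: k -= 1; if k not in deleted: x -= 1`
def bMoveUp (del : PySem.Set Int) (k : Int) (x : Int) : Int :=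
  if h : 0 < x then
    if hc : PySem.Set.contains del (k - 1) then bMoveUp del (k - 1) x
    else bMoveUp del (k - 1) (x - 1)
  else k
termination_by (del.filter (fun e => decide (e < k))).length + x.toNat * (del.length + 1)
decreasing_by
  · have := pvFilterLenLt (d := del) (p := fun e => decide (e < k - 1)) (q := fun e => decide (e < k))
      (by intro a ha; simp_all; omega)
      (List.contains_iff_mem.mp hc) (by simp) (by simp)
    omega
  · have h1 : ((del : List Int).filter (fun e => decide (e < k - 1))).length ≤ del.length :=
      List.length_filter_le _ _
    have h3 : 1 ≤ x.toNat := by omega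
    have h4 : (x.toNat - 1) * (del.length + 1) + (del.length + 1) = x.toNat * (del.length + 1) := by
      nlinarith [Nat.sub_add_cancel h3]
    simp only [show (x - 1).toNat = x.toNat - 1 from by omega]
    omega

-- B's `while x > 0: k += 1; if k not in deleted: x -= 1`
def bMoveDown (del : PySem.Set Int) (k : Int) (x : Int) : Int :=
  if h : 0 < x then
    if hc : PySem.Set.contains del (k + 1) then bMoveDown del (k + 1) x
    else bMoveDown del (k + 1) (x - 1)
  else k
termination_by (del.filter (fun e => decide (k < e))).length + x.toNat * (del.length + 1)
decreasing_by
  · have := pvFilterLenLt (d := del) (p := fun e => decide (k + 1 < e)) (q := fun e => decide (k < e))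
      (by intro a ha; simp_all; omega)
      (List.contains_iff_mem.mp hc) (by simp) (by simp)
    omega
  · have h1 : ((del : List Int).filter (fun e => decide (k + 1 < e))).length ≤ del.length :=
      List.length_filter_le _ _
    have h3 : 1 ≤ x.toNat := by omega
    have h4 : (x.toNat - 1) * (del.length + 1) + (del.length + 1) = x.toNat * (del.length + 1) := by
      nlinarith [Nat.sub_add_cancel h3]
    simp only [show (x - 1).toNat = x.toNat - 1 from by omega]
    omega

-- B's `j = k+1; while j < n and j in deleted: j += 1`
def bScanUp (n : Int) (del : PySem.Set Int) (j : Int) : Int :=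
  if h : j < n ∧ PySem.Set.contains del j then bScanUp n del (j + 1) else j
termination_by (n - j).toNat
decreasing_by omega

-- B's `j = k-1; while j >= 0 and j in deleted: j -= 1`
def bScanDown (del : PySem.Set Int) (j : Int) : Int :=
  if h : 0 ≤ j ∧ PySem.Set.contains del j then bScanDown del (j - 1) else j
termination_by (j + 1).toNat
decreasing_by omega

-- one iteration of B's command loop; none = a Python exception
def bStep (n : Int) (st : PySem.Set Int × List Int × Int) (cmd : String) :
    Option (PySem.Set Int × List Int × Int) :=
  match PySem.Str.pyGet? cmd 0 with
  | none => none
  | some c =>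
    if c = 'U' then
      match PySem.Str.split? cmd " " with
      | none => none
      | some parts =>
        match PySem.List.pyGet? parts 1 with
        | none => none
        | some w =>
          match PySem.Int.ofStr? w with
          | none => none
          | some x => some (st.1, st.2.1, bMoveUp st.1 st.2.2 x)
    else if c = 'D' then
      match PySem.Str.split? cmd " " with
      | none => none
      | some parts =>
        match PySem.List.pyGet? parts 1 with
        | none => none
        | some w =>
          match PySem.Int.ofStr? w with
          | none => none
          | some x => some (st.1, st.2.1, bMoveDown st.1 st.2.2 x)
    else if c = 'C' then
      let stack' := st.2.1 ++ [st.2.2]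
      let del' := PySem.Set.add st.1 st.2.2
      let j := bScanUp n del' (st.2.2 + 1)
      if j < n then some (del', stack', j)
      else some (del', stack', bScanDown del' (st.2.2 - 1))
    else if c = 'Z' then
      match PySem.List.pop? st.2.1 with
      | none => none                   -- stack.pop() on empty: IndexError
      | some (last, stack') => some (PySem.Set.discard st.1 last, stack', st.2.2)
    else some st

def bLoop (n : Int) (cmds : List String) (st : Option (PySem.Set Int × List Int × Int)) :
    Option (PySem.Set Int × List Int × Int) :=
  cmds.foldl (fun s? c => s?.bind (fun s => bStep n s c)) st

def solution_alt (n : Int) (k : Int) (cmds : List String) : String :=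
  match bLoop n cmds (some (PySem.Set.empty, [], k)) with
  | none => ""
  | some st =>
    PySem.Str.join "" ((PySem.List.pyRange 0 n).map
      (fun i => if PySem.Set.contains st.1 i then "X" else "O"))

-- ===== PRECONDITION & SPEC =====
-- nearest not-deleted row above/below (the problem's notion of neighbour)
-- fuel-structural so that `decide` can evaluate Pre_ (fuel (n-j).toNat always suffices)
def seekUpF : Nat → List Int → Int → Int → Option Int
  | 0, _, _, _ => none
  | m + 1, d, n, j => if j < n then (if j ∈ d then seekUpF m d n (j + 1) else some j) else none

def seekUp (d : List Int) (n : Int) (j : Int) : Option Int := seekUpF (n - j).toNat d n j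

def seekDownF : Nat → List Int → Int → Option Int
  | 0, _, _ => none
  | m + 1, d, j => if 0 ≤ j then (if j ∈ d then seekDownF m d (j - 1) else some j) else none

def seekDown (d : List Int) (j : Int) : Option Int := seekDownF (j + 1).toNat d j

-- can the cursor take x up/down moves without walking off the table?
def chkMoveF : Nat → Int → List Int → Char → Int → Int → Option Int
  | 0, _, _, _, k, _ => some k
  | m + 1, n, d, c, k, x =>
    if 0 < x then
      match (if c = 'U' then seekDown d (k - 1) else seekUp d n (k + 1)) with
      | none => none
      | some k' => chkMoveF m n d c k' (x - 1)
    else some k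

def chkMove (n : Int) (d : List Int) (c : Char) (k : Int) (x : Int) : Option Int :=
  chkMoveF x.toNat n d c k x

-- validity of a command sequence: the cursor stays on a live row, moves never leave the
-- table, 'C' always has a live neighbour, 'Z' never undoes with nothing deleted
def pvValid (n : Int) : Int → List Int → List String → Bool
  | _, _, [] => true
  | k, d, cmd :: rest =>
    match PySem.Str.pyGet? cmd 0 with
    | none => false
    | some c =>
      if c = 'U' ∨ c = 'D' then
        match PySem.Str.split? cmd " " with
        | none => false
        | some parts =>
          match PySem.List.pyGet? parts 1 with
          | none => false
          | some w =>
            match PySem.Int.ofStr? w with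
            | none => false
            | some x =>
              if 0 < x then
                if 0 ≤ k ∧ k < n ∧ k ∉ d then
                  match chkMove n d c k x with
                  | none => false
                  | some k' => pvValid n k' d rest
                else false
              else pvValid n k d rest
      else if c = 'C' then
        if 0 ≤ k ∧ k < n ∧ k ∉ d then
          match seekUp d n (k + 1), seekDown d (k - 1) with
          | none, none => false
          | some r, _ => pvValid n r (d ++ [k]) rest
          | none, some p => pvValid n p (d ++ [k]) rest
        else false
      else if c = 'Z' then
        match d.getLast? with
        | none => false
        | some _ => pvValid n k d.dropLast rest
      else pvValid n k d rest

-- Pre_ excludes exactly: n < 2 (A's setup raises IndexError), command sequences on which A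
-- raises (walking off the table, deleting the last live row, undoing with nothing deleted,
-- malformed 'U'/'D' arguments, empty command strings), and runs whose effective commands use
-- a cursor outside 0..n-1 — there A silently relies on Python's negative-index wraparound,
-- which is outside the task's natural domain.
def Pre_solution (n : Int) (k : Int) (cmds : List String) : Prop :=
  2 ≤ n ∧ pvValid n k [] cmds = true
instance (n : Int) (k : Int) (cmds : List String) : Decidable (Pre_solution n k cmds) := by
  unfold Pre_solution; infer_instance

def pvWitness_solution : Int × Int × List String := (4, 1, ["D 2", "C", "U 1", "Z", "C"])

def Spec_solution (n : Int) (k : Int) (cmds : List String) (out : String) : Prop :=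
  out = solution_alt n k cmds
instance (n : Int) (k : Int) (cmds : List String) (out : String) :
    Decidable (Spec_solution n k cmds out) := by unfold Spec_solution; infer_instance

-- ===== CLAIM (what is proved, stated in full; the proofs are below) =====
def Claim_equal_solution : Prop := ∀ (n : Int) (k : Int) (cmds : List String),
  Dom_solution n k cmds → Pre_solution n k cmds → Spec_solution n k cmds (solution n k cmds)

-- ===== LEMMAS AND PROOFS =====

theorem seekUp_unfold (d : List Int) (n j : Int) :
    seekUp d n j = if j < n then (if j ∈ d then seekUp d n (j + 1) else some j) else none := by
  unfold seekUp
  by_cases h : j < n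
  · rw [show (n - j).toNat = (n - (j + 1)).toNat + 1 by omega]
    simp only [seekUpF, if_pos h]
  · rw [show (n - j).toNat = 0 by omega]
    simp only [seekUpF, if_neg h]

theorem seekDown_unfold (d : List Int) (j : Int) :
    seekDown d j = if 0 ≤ j then (if j ∈ d then seekDown d (j - 1) else some j) else none := by
  unfold seekDown
  by_cases h : 0 ≤ j
  · rw [show (j + 1).toNat = ((j - 1) + 1).toNat + 1 by omega]
    simp only [seekDownF, if_pos h]
  · rw [show (j + 1).toNat = 0 by omega]
    simp only [seekDownF, if_neg h]

theorem chkMove_unfold (n : Int) (d : List Int) (c : Char) (k x : Int) :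
    chkMove n d c k x =
      if 0 < x then
        match (if c = 'U' then seekDown d (k - 1) else seekUp d n (k + 1)) with
        | none => none
        | some k' => chkMove n d c k' (x - 1)
      else some k := by
  unfold chkMove
  by_cases h : 0 < x
  · rw [show x.toNat = (x - 1).toNat + 1 by omega]
    simp only [chkMoveF, if_pos h]
  · rw [show x.toNat = 0 by omega]
    simp only [chkMoveF, if_neg h]

theorem seekUp_some {d : List Int} {n j r : Int} (h : seekUp d n j = some r) :
    j ≤ r ∧ r < n ∧ r ∉ d ∧ ∀ t, j ≤ t → t < r → t ∈ d := by
  have H : ∀ (m : Nat), ∀ j, (n - j).toNat ≤ m → seekUp d n j = some r →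
      j ≤ r ∧ r < n ∧ r ∉ d ∧ ∀ t, j ≤ t → t < r → t ∈ d := by
    intro m
    induction m with
    | zero =>
      intro j hm h
      rw [seekUp_unfold, if_neg (by omega)] at h
      cases h
    | succ m ih =>
      intro j hm h
      rw [seekUp_unfold] at h
      by_cases h1 : j < n
      · rw [if_pos h1] at h
        by_cases h2 : j ∈ d
        · rw [if_pos h2] at h
          obtain ⟨g1, g2, g3, g4⟩ := ih (j + 1) (by omega) h
          refine ⟨by omega, g2, g3, fun t ht1 ht2 => ?_⟩
          rcases eq_or_lt_of_le ht1 with rfl | h'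
          · exact h2
          · exact g4 t (by omega) ht2
        · rw [if_neg h2] at h
          simp only [Option.some.injEq] at h
          subst h
          exact ⟨le_refl _, h1, h2, fun t ht1 ht2 => absurd ht2 (by omega)⟩
      · rw [if_neg h1] at h
        cases h
  exact H (n - j).toNat j le_rfl h

theorem seekUp_of {d : List Int} {n j r : Int} (h1 : j ≤ r) (h2 : r < n) (h3 : r ∉ d)
    (h4 : ∀ t, j ≤ t → t < r → t ∈ d) : seekUp d n j = some r := by
  have H : ∀ (m : Nat), ∀ j, (r - j).toNat ≤ m → j ≤ r → (∀ t, j ≤ t → t < r → t ∈ d) →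
      seekUp d n j = some r := by
    intro m
    induction m with
    | zero =>
      intro j hm hj h4
      have : j = r := by omega
      subst this
      rw [seekUp_unfold, if_pos h2, if_neg h3]
    | succ m ih =>
      intro j hm hj h4
      rcases eq_or_lt_of_le hj with rfl | hlt
      · rw [seekUp_unfold, if_pos h2, if_neg h3]
      · rw [seekUp_unfold, if_pos (by omega), if_pos (h4 j le_rfl hlt)]
        exact ih (j + 1) (by omega) (by omega) (fun t ht1 ht2 => h4 t (by omega) ht2)
  exact H (r - j).toNat j le_rfl h1 h4

theorem seekUp_none {d : List Int} {n j : Int} (h : seekUp d n j = none) :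
    ∀ t, j ≤ t → t < n → t ∈ d := by
  have H : ∀ (m : Nat), ∀ j, (n - j).toNat ≤ m → seekUp d n j = none →
      ∀ t, j ≤ t → t < n → t ∈ d := by
    intro m
    induction m with
    | zero => intro j hm h t ht1 ht2; omega
    | succ m ih =>
      intro j hm h t ht1 ht2
      rw [seekUp_unfold, if_pos (by omega)] at h
      by_cases h2 : j ∈ d
      · rw [if_pos h2] at h
        rcases eq_or_lt_of_le ht1 with rfl | h'
        · exact h2
        · exact ih (j + 1) (by omega) h t (by omega) ht2
      · rw [if_neg h2] at h; cases h
  exact H (n - j).toNat j le_rfl h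

theorem seekUp_none_of {d : List Int} {n j : Int} (h : ∀ t, j ≤ t → t < n → t ∈ d) :
    seekUp d n j = none := by
  have H : ∀ (m : Nat), ∀ j, (n - j).toNat ≤ m → (∀ t, j ≤ t → t < n → t ∈ d) →
      seekUp d n j = none := by
    intro m
    induction m with
    | zero => intro j hm h; rw [seekUp_unfold, if_neg (by omega)]
    | succ m ih =>
      intro j hm h
      by_cases h1 : j < n
      · rw [seekUp_unfold, if_pos h1, if_pos (h j le_rfl h1)]
        exact ih (j + 1) (by omega) (fun t ht1 ht2 => h t (by omega) ht2)
      · rw [seekUp_unfold, if_neg h1]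
  exact H (n - j).toNat j le_rfl h

theorem seekDown_some {d : List Int} {j r : Int} (h : seekDown d j = some r) :
    r ≤ j ∧ 0 ≤ r ∧ r ∉ d ∧ ∀ t, r < t → t ≤ j → t ∈ d := by
  have H : ∀ (m : Nat), ∀ j, (j + 1).toNat ≤ m → seekDown d j = some r →
      r ≤ j ∧ 0 ≤ r ∧ r ∉ d ∧ ∀ t, r < t → t ≤ j → t ∈ d := by
    intro m
    induction m with
    | zero =>
      intro j hm h
      rw [seekDown_unfold, if_neg (by omega)] at h
      cases h
    | succ m ih =>
      intro j hm h
      rw [seekDown_unfold] at h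
      by_cases h1 : 0 ≤ j
      · rw [if_pos h1] at h
        by_cases h2 : j ∈ d
        · rw [if_pos h2] at h
          obtain ⟨g1, g2, g3, g4⟩ := ih (j - 1) (by omega) h
          refine ⟨by omega, g2, g3, fun t ht1 ht2 => ?_⟩
          rcases eq_or_lt_of_le ht2 with rfl | h'
          · exact h2
          · exact g4 t ht1 (by omega)
        · rw [if_neg h2] at h
          simp only [Option.some.injEq] at h
          subst h
          exact ⟨le_refl _, h1, h2, fun t ht1 ht2 => absurd ht1 (by omega)⟩
      · rw [if_neg h1] at h
        cases h
  exact H (j + 1).toNat j le_rfl h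

theorem seekDown_of {d : List Int} {j r : Int} (h1 : r ≤ j) (h2 : 0 ≤ r) (h3 : r ∉ d)
    (h4 : ∀ t, r < t → t ≤ j → t ∈ d) : seekDown d j = some r := by
  have H : ∀ (m : Nat), ∀ j, (j - r).toNat ≤ m → r ≤ j → (∀ t, r < t → t ≤ j → t ∈ d) →
      seekDown d j = some r := by
    intro m
    induction m with
    | zero =>
      intro j hm hj h4
      have : j = r := by omega
      subst this
      rw [seekDown_unfold, if_pos h2, if_neg h3]
    | succ m ih =>
      intro j hm hj h4
      rcases eq_or_lt_of_le hj with rfl | hlt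
      · rw [seekDown_unfold, if_pos h2, if_neg h3]
      · rw [seekDown_unfold, if_pos (by omega), if_pos (h4 j hlt le_rfl)]
        exact ih (j - 1) (by omega) (by omega) (fun t ht1 ht2 => h4 t ht1 (by omega))
  exact H (j - r).toNat j le_rfl h1 h4

theorem seekDown_none {d : List Int} {j : Int} (h : seekDown d j = none) :
    ∀ t, 0 ≤ t → t ≤ j → t ∈ d := by
  have H : ∀ (m : Nat), ∀ j, (j + 1).toNat ≤ m → seekDown d j = none →
      ∀ t, 0 ≤ t → t ≤ j → t ∈ d := by
    intro m
    induction m with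
    | zero => intro j hm h t ht1 ht2; omega
    | succ m ih =>
      intro j hm h t ht1 ht2
      rw [seekDown_unfold, if_pos (by omega)] at h
      by_cases h2 : j ∈ d
      · rw [if_pos h2] at h
        rcases eq_or_lt_of_le ht2 with rfl | h'
        · exact h2
        · exact ih (j - 1) (by omega) h t ht1 (by omega)
      · rw [if_neg h2] at h; cases h
  exact H (j + 1).toNat j le_rfl h

theorem seekDown_none_of {d : List Int} {j : Int} (h : ∀ t, 0 ≤ t → t ≤ j → t ∈ d) :
    seekDown d j = none := by
  have H : ∀ (m : Nat), ∀ j, (j + 1).toNat ≤ m → (∀ t, 0 ≤ t → t ≤ j → t ∈ d) →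
      seekDown d j = none := by
    intro m
    induction m with
    | zero => intro j hm h; rw [seekDown_unfold, if_neg (by omega)]
    | succ m ih =>
      intro j hm h
      by_cases h1 : 0 ≤ j
      · rw [seekDown_unfold, if_pos h1, if_pos (h j h1 le_rfl)]
        exact ih (j - 1) (by omega) (fun t ht1 ht2 => h t ht1 (by omega))
      · rw [seekDown_unfold, if_neg h1]
  exact H (j + 1).toNat j le_rfl h

theorem seekUp_append_ne {d : List Int} {n j a m : Int} (h : seekUp d n j = some m) (hne : m ≠ a) :
    seekUp (d ++ [a]) n j = some m := by
  obtain ⟨h1, h2, h3, h4⟩ := seekUp_some h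
  exact seekUp_of h1 h2 (by simp [hne]; exact h3)
    (fun t ht1 ht2 => List.mem_append_left _ (h4 t ht1 ht2))

theorem seekUp_append_none {d : List Int} {n j a : Int} (h : seekUp d n j = none) :
    seekUp (d ++ [a]) n j = none := by
  exact seekUp_none_of (fun t ht1 ht2 => List.mem_append_left _ (seekUp_none h t ht1 ht2))

theorem seekDown_append_ne {d : List Int} {j a m : Int} (h : seekDown d j = some m) (hne : m ≠ a) :
    seekDown (d ++ [a]) j = some m := by
  obtain ⟨h1, h2, h3, h4⟩ := seekDown_some h
  exact seekDown_of h1 h2 (by simp [hne]; exact h3)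
    (fun t ht1 ht2 => List.mem_append_left _ (h4 t ht1 ht2))

theorem seekDown_append_none {d : List Int} {j a : Int} (h : seekDown d j = none) :
    seekDown (d ++ [a]) j = none := by
  exact seekDown_none_of (fun t ht1 ht2 => List.mem_append_left _ (seekDown_none h t ht1 ht2))

theorem seekUp_append_lt {d : List Int} {n j a : Int} (h : a < j) :
    seekUp (d ++ [a]) n j = seekUp d n j := by
  cases e : seekUp d n j with
  | some m =>
    have ⟨h1, _, _, _⟩ := seekUp_some e
    exact seekUp_append_ne e (by omega)
  | none => exact seekUp_append_none e

theorem seekDown_append_gt {d : List Int} {j a : Int} (h : j < a) :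
    seekDown (d ++ [a]) j = seekDown d j := by
  cases e : seekDown d j with
  | some m =>
    have ⟨h1, _, _, _⟩ := seekDown_some e
    exact seekDown_append_ne e (by omega)
  | none => exact seekDown_append_none e

theorem seekUp_to_seekDown {d : List Int} {n i m : Int} (h : seekUp d n (i + 1) = some m)
    (hi : 0 ≤ i) (hid : i ∉ d) : seekDown d (m - 1) = some i := by
  obtain ⟨h1, h2, h3, h4⟩ := seekUp_some h
  exact seekDown_of (by omega) hi hid (fun t ht1 ht2 => h4 t (by omega) (by omega))

theorem seekDown_to_seekUp {d : List Int} {n i p : Int} (h : seekDown d (i - 1) = some p)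
    (hi : i < n) (hid : i ∉ d) : seekUp d n (p + 1) = some i := by
  obtain ⟨h1, h2, h3, h4⟩ := seekDown_some h
  exact seekUp_of (by omega) hi hid (fun t ht1 ht2 => h4 t (by omega) (by omega))

-- the deleted-set as it was when row e was deleted
def ctx (d : List Int) (e : Int) : List Int := d.takeWhile (fun a => a ≠ e)

theorem ctx_not_mem {d : List Int} {e : Int} (h : e ∉ d) : ctx d e = d := by
  unfold ctx
  induction d with
  | nil => rfl
  | cons a d ih =>
    simp only [List.mem_cons, not_or] at h
    have hne : ¬ a = e := fun he => h.1 he.symm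
    have ih' := ih h.2
    simp only [ne_eq, decide_not] at ih' ⊢
    simp [List.takeWhile_cons, hne, ih']
theorem ctx_append_self {d : List Int} {e : Int} (h : e ∉ d) : ctx (d ++ [e]) e = d := by
  unfold ctx
  induction d with
  | nil => simp
  | cons a d ih =>
    simp only [List.mem_cons, not_or] at h
    have hne : ¬ a = e := fun he => h.1 he.symm
    have ih' := ih h.2
    simp only [ne_eq, decide_not] at ih' ⊢
    simp [List.takeWhile_cons, hne, ih']
theorem ctx_append_mem {d l : List Int} {e : Int} (h : e ∈ d) : ctx (d ++ l) e = ctx d e := by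
  unfold ctx
  induction d with
  | nil => simp at h
  | cons a d ih =>
    rcases List.mem_cons.mp h with rfl | hm
    · simp [List.takeWhile_cons]
    · by_cases ha : a = e
      · subst ha; simp [List.takeWhile_cons]
      · have ih' := ih hm
        simp only [ne_eq, decide_not] at ih' ⊢
        simp [ha, ih']

-- the linked-list invariant: pointers of live rows are their live neighbours; pointers of a
-- deleted row are its neighbours as of its deletion time
def LLInv (n : Int) (nxt prv : List (Option Int)) (d : List Int) : Prop :=
  nxt.length = n.toNat ∧ prv.length = n.toNat ∧ d.Nodup ∧ (∀ e ∈ d, 0 ≤ e ∧ e < n) ∧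
  (∀ i : Int, 0 ≤ i → i < n →
    nxt[i.toNat]? = some (seekUp (ctx d i) n (i + 1)) ∧
    prv[i.toNat]? = some (seekDown (ctx d i) (i - 1)))

theorem foldl_set_getElem? {α : Type} (f : Int → α) :
    ∀ (l : List Int) (acc : List α), (∀ e ∈ l, 0 ≤ e ∧ e.toNat < acc.length) → ∀ j : Nat,
      (l.foldl (fun a e => a.set e.toNat (f e)) acc)[j]? =
        if (j : Int) ∈ l then some (f j) else acc[j]? := by
  intro l
  induction l with
  | nil => intro acc _ j; simp
  | cons e l ih =>
    intro acc hb j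
    simp only [List.foldl_cons]
    rw [ih _ (fun a ha => by
      have := hb a (List.mem_cons_of_mem _ ha); simpa [List.length_set] using this)]
    have he := hb e (List.mem_cons_self ..)
    by_cases hm : (j : Int) ∈ l
    · simp [hm, List.mem_cons]
    · simp only [hm, if_false]
      rw [List.getElem?_set]
      by_cases hje : e.toNat = j
      · have hje' : (j : Int) = e := by omega
        rw [if_pos hje, if_pos he.2, if_pos (List.mem_cons.mpr (Or.inl hje')), hje']
      · have : ¬((j : Int) = e ∨ (j:Int) ∈ l) := by
          rintro (h1 | h2)
          · omega
          · exact hm h2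
        simp [List.mem_cons, this, hje]

theorem foldl_set_length {α : Type} (f : Int → α) :
    ∀ (l : List Int) (acc : List α),
      (l.foldl (fun a e => a.set e.toNat (f e)) acc).length = acc.length := by
  intro l
  induction l with
  | nil => intro acc; rfl
  | cons e l ih => intro acc; simp [List.foldl_cons, ih, List.length_set]

theorem llinv_init {n : Int} (hn : 2 ≤ n) : LLInv n (aInit n).2 (aInit n).1 [] := by
  have hlen0 : ∀ (v : Option Int), ((PySem.List.pyRange 0 n).map (fun _ => v)).length = n.toNat := by
    intro v; simp [PySem.List.length_pyRange_one]
  have hget0 : ∀ (v : Option Int) (j : Nat), j < n.toNat →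
      (((PySem.List.pyRange 0 n).map (fun _ => v)))[j]? = some v := by
    intro v j hj
    rw [List.getElem?_map, List.getElem?_eq_getElem (by simpa [PySem.List.length_pyRange_one] using hj)]
    rfl
  unfold aInit
  rw [PySem.List.pySetD_of_nonneg _ _ (by omega : (0:Int) ≤ 0),
    PySem.List.pySetD_of_nonneg _ _ (by omega : (0:Int) ≤ n - 1)]
  rw [PySem.List.foldl_congr_mem _ _
    (fun (s : List (Option Int) × List (Option Int)) i =>
      (s.1.set i.toNat (some (i - 1)), s.2.set i.toNat (some (i + 1))))
    _ (by
      intro acc x hx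
      have hx' := PySem.List.mem_pyRange_one.mp hx
      rw [PySem.List.pySetD_of_nonneg _ _ (by omega : (0:Int) ≤ x),
        PySem.List.pySetD_of_nonneg _ _ (by omega : (0:Int) ≤ x)])]
  rw [PySem.List.foldl_prod_mk
    (fun (a : List (Option Int)) (e : Int) => a.set e.toNat (some (e - 1)))
    (fun (a : List (Option Int)) (e : Int) => a.set e.toNat (some (e + 1)))]
  have hlen1 : (((PySem.List.pyRange 0 n).map (fun _ => (none : Option Int))).set (0:Int).toNat (some 1)).length = n.toNat := by
    simp [List.length_set, hlen0]
  have hlen2 : (((PySem.List.pyRange 0 n).map (fun _ => (none : Option Int))).set (n-1).toNat (some (n-2))).length = n.toNat := by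
    simp [List.length_set, hlen0]
  have hmem : ∀ e ∈ PySem.List.pyRange 1 (n-1), 0 ≤ e ∧ e.toNat < n.toNat := by
    intro e he; have := PySem.List.mem_pyRange_one.mp he; omega
  constructor
  · rw [foldl_set_length]; exact hlen1
  constructor
  · rw [foldl_set_length]; exact hlen2
  refine ⟨List.nodup_nil, by simp, ?_⟩
  intro i hi0 hin
  have hjn : i.toNat < n.toNat := by omega
  have hctx : ctx [] i = [] := rfl
  have hsu : seekUp ([] : List Int) n (i + 1) = if i + 1 < n then some (i + 1) else none := by
    by_cases h : i + 1 < n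
    · rw [if_pos h]; exact seekUp_of (le_refl _) h (by simp) (fun t ht1 ht2 => by omega)
    · rw [if_neg h]; exact seekUp_none_of (fun t ht1 ht2 => by omega)
  have hsd : seekDown ([] : List Int) (i - 1) = if 0 ≤ i - 1 then some (i - 1) else none := by
    by_cases h : 0 ≤ i - 1
    · rw [if_pos h]; exact seekDown_of (le_refl _) h (by simp) (fun t ht1 ht2 => by omega)
    · rw [if_neg h]; exact seekDown_none_of (fun t ht1 ht2 => by omega)
  rw [hctx, hsu, hsd]
  constructor
  · -- next pointers
    rw [foldl_set_getElem? _ _ _ (fun e he => ⟨(PySem.List.mem_pyRange_one.mp he).1.trans' (by omega), by rw [hlen1]; exact (hmem e he).2⟩)]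
    by_cases hmemi : (i.toNat : Int) ∈ PySem.List.pyRange 1 (n-1)
    · have hb := PySem.List.mem_pyRange_one.mp hmemi
      rw [if_pos hmemi]
      have : (i.toNat : Int) = i := by omega
      rw [this, if_pos (by omega)]
    · have hb : ¬(1 ≤ i ∧ i < n - 1) := by
        intro hc; exact hmemi (PySem.List.mem_pyRange_one.mpr (by omega))
      rw [if_neg hmemi, List.getElem?_set]
      by_cases h0 : i = 0
      · subst h0
        simp only [Int.toNat_zero, if_pos rfl, if_pos (by rw [hlen0]; omega : 0 < ((PySem.List.pyRange 0 n).map (fun _ => (none : Option Int))).length)]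
        rw [if_pos (by omega : (0:Int) + 1 < n)]
        norm_num
      · have hne : ¬ (0:Int).toNat = i.toNat := by omega
        rw [if_neg hne, hget0 _ _ hjn]
        have : i = n - 1 := by omega
        rw [if_neg (by omega : ¬ i + 1 < n)]
  · -- prev pointers
    rw [foldl_set_getElem? _ _ _ (fun e he => ⟨(PySem.List.mem_pyRange_one.mp he).1.trans' (by omega), by rw [hlen2]; exact (hmem e he).2⟩)]
    by_cases hmemi : (i.toNat : Int) ∈ PySem.List.pyRange 1 (n-1)
    · have hb := PySem.List.mem_pyRange_one.mp hmemi
      rw [if_pos hmemi]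
      have : (i.toNat : Int) = i := by omega
      rw [this, if_pos (by omega)]
    · have hb : ¬(1 ≤ i ∧ i < n - 1) := by
        intro hc; exact hmemi (PySem.List.mem_pyRange_one.mpr (by omega))
      rw [if_neg hmemi, List.getElem?_set]
      by_cases h0 : i = n - 1
      · subst h0
        rw [if_pos (by omega), if_pos (by rw [hlen0]; omega), if_pos (by omega)]
        congr 2
        omega
      · have hne : ¬ (n-1).toNat = i.toNat := by omega
        rw [if_neg hne, hget0 _ _ hjn]
        have : i = 0 := by omega
        subst this
        rw [if_neg (by omega : ¬ (0:Int) ≤ 0 - 1)]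

-- write v at an optional index (the pointer-surgery step)
def oset (xs : List (Option Int)) (o : Option Int) (v : Option Int) : List (Option Int) :=
  match o with
  | some i => xs.set i.toNat v
  | none => xs

theorem oset_length (xs : List (Option Int)) (o v : Option Int) :
    (oset xs o v).length = xs.length := by
  cases o <;> simp [oset]

theorem oset_getElem? (xs : List (Option Int)) (o v : Option Int)
    (ho : ∀ i, o = some i → 0 ≤ i ∧ i.toNat < xs.length) (j : Nat) :
    (oset xs o v)[j]? = if o = some (j : Int) then some v else xs[j]? := by
  cases o with
  | none => simp [oset]
  | some i =>
    obtain ⟨hi0, hil⟩ := ho i rfl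
    simp only [oset, List.getElem?_set]
    by_cases hij : i.toNat = j
    · rw [if_pos hij, if_pos hil, if_pos (by simp only [Option.some.injEq]; omega)]
    · rw [if_neg hij, if_neg (by simp only [Option.some.injEq]; omega)]

theorem llinv_C {n : Int} {nxt prv : List (Option Int)} {d : List Int} {k : Int}
    (hInv : LLInv n nxt prv d) (hk0 : 0 ≤ k) (hkn : k < n) (hkd : k ∉ d) :
    LLInv n (oset nxt (seekDown d (k - 1)) (seekUp d n (k + 1)))
            (oset prv (seekUp d n (k + 1)) (seekDown d (k - 1)))
            (d ++ [k]) := by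
  obtain ⟨hln, hlp, hnd, hrg, hptr⟩ := hInv
  have hsdB : ∀ i, seekDown d (k - 1) = some i → 0 ≤ i ∧ i ≤ k - 1 ∧ i ∉ d :=
    fun i h => ⟨(seekDown_some h).2.1, (seekDown_some h).1, (seekDown_some h).2.2.1⟩
  have hsuB : ∀ i, seekUp d n (k + 1) = some i → k + 1 ≤ i ∧ i < n ∧ i ∉ d :=
    fun i h => ⟨(seekUp_some h).1, (seekUp_some h).2.1, (seekUp_some h).2.2.1⟩
  refine ⟨?_, ?_, ?_, ?_, ?_⟩
  · rw [oset_length]; exact hln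
  · rw [oset_length]; exact hlp
  · have hne : ∀ a ∈ d, ¬ a = k := fun a ha hak => hkd (hak ▸ ha)
    simp [List.nodup_append, hnd, hkd]
    exact hne
  · intro e he
    rcases List.mem_append.mp he with h | h
    · exact hrg e h
    · simp only [List.mem_singleton] at h; subst h; exact ⟨hk0, hkn⟩
  · intro i hi0 hin
    have hGn := oset_getElem? nxt (seekDown d (k - 1)) (seekUp d n (k + 1))
      (fun p hp => ⟨(hsdB p hp).1, by have := hsdB p hp; rw [hln]; omega⟩) i.toNat
    have hGp := oset_getElem? prv (seekUp d n (k + 1)) (seekDown d (k - 1))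
      (fun r hr => ⟨by have := hsuB r hr; omega, by have := hsuB r hr; rw [hlp]; omega⟩) i.toNat
    rw [Int.toNat_of_nonneg hi0] at hGn hGp
    by_cases hik : i = k
    · subst hik
      have hc1 : ¬ seekDown d (i - 1) = some i := fun h => by have := hsdB i h; omega
      have hc2 : ¬ seekUp d n (i + 1) = some i := fun h => by have := hsuB i h; omega
      rw [hGn, hGp, if_neg hc1, if_neg hc2, ctx_append_self hkd,
        (hptr i hi0 hin).1, (hptr i hi0 hin).2, ctx_not_mem hkd]
      exact ⟨rfl, rfl⟩
    by_cases hid : i ∈ d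
    · have hc1 : ¬ seekDown d (k - 1) = some i := fun h => (hsdB i h).2.2 hid
      have hc2 : ¬ seekUp d n (k + 1) = some i := fun h => (hsuB i h).2.2 hid
      rw [hGn, hGp, if_neg hc1, if_neg hc2, ctx_append_mem hid]
      exact hptr i hi0 hin
    · -- i is a live row, different from k
      have hctxi : ctx (d ++ [k]) i = d ++ [k] :=
        ctx_not_mem (by simp [hid, hik])
      have hctxi' : ctx d i = d := ctx_not_mem hid
      rw [hGn, hGp, hctxi]
      constructor
      · by_cases hpd : seekDown d (k - 1) = some i
        · rw [if_pos hpd]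
          have hch := seekDown_some hpd
          have : seekUp (d ++ [k]) n (i + 1) = seekUp d n (k + 1) := by
            cases e : seekUp d n (k + 1) with
            | some r =>
              have hr := seekUp_some e
              exact seekUp_of (by omega) hr.2.1
                (by simp only [List.mem_append, List.mem_singleton]
                    push_neg
                    exact ⟨hr.2.2.1, by omega⟩)
                (fun t ht1 ht2 => by
                  rcases lt_trichotomy t k with h | h | h
                  · exact List.mem_append_left _ (hch.2.2.2 t (by omega) (by omega))
                  · subst h; exact List.mem_append_right _ (by simp)
                  · exact List.mem_append_left _ (hr.2.2.2 t (by omega) ht2))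
            | none =>
              refine seekUp_none_of (fun t ht1 ht2 => ?_)
              rcases lt_trichotomy t k with h | h | h
              · exact List.mem_append_left _ (hch.2.2.2 t (by omega) (by omega))
              · subst h; exact List.mem_append_right _ (by simp)
              · exact List.mem_append_left _ (seekUp_none e t (by omega) ht2)
          rw [this]
        · rw [if_neg hpd, (hptr i hi0 hin).1, hctxi']
          have : seekUp (d ++ [k]) n (i + 1) = seekUp d n (i + 1) := by
            cases e : seekUp d n (i + 1) with
            | some m =>
              have hmk : m ≠ k := by
                intro hc; subst hc
                exact hpd (seekUp_to_seekDown e hi0 hid)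
              exact seekUp_append_ne e hmk
            | none => exact seekUp_append_none e
          rw [this]
      · by_cases hrd : seekUp d n (k + 1) = some i
        · rw [if_pos hrd]
          have hch := seekUp_some hrd
          have : seekDown (d ++ [k]) (i - 1) = seekDown d (k - 1) := by
            cases e : seekDown d (k - 1) with
            | some p =>
              have hp := seekDown_some e
              exact seekDown_of (by omega) hp.2.1
                (by simp only [List.mem_append, List.mem_singleton]
                    push_neg
                    exact ⟨hp.2.2.1, by omega⟩)
                (fun t ht1 ht2 => by
                  rcases lt_trichotomy t k with h | h | h
                  · exact List.mem_append_left _ (hp.2.2.2 t ht1 (by omega))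
                  · subst h; exact List.mem_append_right _ (by simp)
                  · exact List.mem_append_left _ (hch.2.2.2 t (by omega) (by omega)))
            | none =>
              refine seekDown_none_of (fun t ht1 ht2 => ?_)
              rcases lt_trichotomy t k with h | h | h
              · exact List.mem_append_left _ (seekDown_none e t ht1 (by omega))
              · subst h; exact List.mem_append_right _ (by simp)
              · exact List.mem_append_left _ (hch.2.2.2 t (by omega) (by omega))
          rw [this]
        · rw [if_neg hrd, (hptr i hi0 hin).2, hctxi']
          have : seekDown (d ++ [k]) (i - 1) = seekDown d (i - 1) := by
            cases e : seekDown d (i - 1) with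
            | some m =>
              have hmk : m ≠ k := by
                intro hc; subst hc
                exact hrd (seekDown_to_seekUp e hin hid)
              exact seekDown_append_ne e hmk
            | none => exact seekDown_append_none e
          rw [this]

theorem llinv_Z {n : Int} {nxt prv : List (Option Int)} {d0 : List Int} {last : Int}
    (hInv : LLInv n nxt prv (d0 ++ [last])) :
    LLInv n (oset nxt (seekDown d0 (last - 1)) (some last))
            (oset prv (seekUp d0 n (last + 1)) (some last))
            d0 := by
  obtain ⟨hln, hlp, hnd, hrg, hptr⟩ := hInv
  have hnd0 : d0.Nodup ∧ last ∉ d0 := by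
    rw [← List.concat_eq_append, List.nodup_concat] at hnd
    exact ⟨hnd.2, hnd.1⟩
  have hl0 : 0 ≤ last ∧ last < n := hrg last (List.mem_append_right _ (by simp))
  have hsdB : ∀ i, seekDown d0 (last - 1) = some i → 0 ≤ i ∧ i ≤ last - 1 ∧ i ∉ d0 :=
    fun i h => ⟨(seekDown_some h).2.1, (seekDown_some h).1, (seekDown_some h).2.2.1⟩
  have hsuB : ∀ i, seekUp d0 n (last + 1) = some i → last + 1 ≤ i ∧ i < n ∧ i ∉ d0 :=
    fun i h => ⟨(seekUp_some h).1, (seekUp_some h).2.1, (seekUp_some h).2.2.1⟩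
  refine ⟨?_, ?_, hnd0.1, fun e he => hrg e (List.mem_append_left _ he), ?_⟩
  · rw [oset_length]; exact hln
  · rw [oset_length]; exact hlp
  · intro i hi0 hin
    have hGn := oset_getElem? nxt (seekDown d0 (last - 1)) (some last)
      (fun p hp => ⟨(hsdB p hp).1, by rw [hln]; have := hsdB p hp; omega⟩) i.toNat
    have hGp := oset_getElem? prv (seekUp d0 n (last + 1)) (some last)
      (fun r hr => ⟨by have := hsuB r hr; omega, by rw [hlp]; have := hsuB r hr; omega⟩) i.toNat
    rw [Int.toNat_of_nonneg hi0] at hGn hGp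
    by_cases hil : i = last
    · subst hil
      have hc1 : ¬ seekDown d0 (i - 1) = some i := fun h => by have := hsdB i h; omega
      have hc2 : ¬ seekUp d0 n (i + 1) = some i := fun h => by have := hsuB i h; omega
      have h1 := (hptr _ hi0 hin).1
      have h2 := (hptr _ hi0 hin).2
      rw [ctx_append_self hnd0.2] at h1 h2
      rw [hGn, hGp, if_neg hc1, if_neg hc2, h1, h2, ctx_not_mem hnd0.2]
      exact ⟨rfl, rfl⟩
    by_cases hid : i ∈ d0
    · have hc1 : ¬ seekDown d0 (last - 1) = some i := fun h => (hsdB i h).2.2 hid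
      have hc2 : ¬ seekUp d0 n (last + 1) = some i := fun h => (hsuB i h).2.2 hid
      rw [hGn, hGp, if_neg hc1, if_neg hc2]
      have h := hptr i hi0 hin
      rw [ctx_append_mem hid] at h
      exact h
    · -- i is live both before and after the undo
      have hibig : i ∉ d0 ++ [last] := by simp [hid, hil]
      have hctxi : ctx (d0 ++ [last]) i = d0 ++ [last] := ctx_not_mem hibig
      have hctxi0 : ctx d0 i = d0 := ctx_not_mem hid
      rw [hGn, hGp, hctxi0]
      constructor
      · by_cases hpd : seekDown d0 (last - 1) = some i
        · rw [if_pos hpd]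
          rw [seekDown_to_seekUp (i := last) hpd hl0.2 hnd0.2]
        · rw [if_neg hpd, (hptr i hi0 hin).1, hctxi]
          have : seekUp (d0 ++ [last]) n (i + 1) = seekUp d0 n (i + 1) := by
            cases e : seekUp d0 n (i + 1) with
            | some m =>
              have hmk : m ≠ last := by
                intro hc; subst hc
                exact hpd (seekUp_to_seekDown e hi0 hid)
              exact seekUp_append_ne e hmk
            | none => exact seekUp_append_none e
          rw [this]
      · by_cases hrd : seekUp d0 n (last + 1) = some i
        · rw [if_pos hrd]
          rw [seekUp_to_seekDown (i := last) hrd hl0.1 hnd0.2]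
        · rw [if_neg hrd, (hptr i hi0 hin).2, hctxi]
          have : seekDown (d0 ++ [last]) (i - 1) = seekDown d0 (i - 1) := by
            cases e : seekDown d0 (i - 1) with
            | some m =>
              have hmk : m ≠ last := by
                intro hc; subst hc
                exact hrd (seekDown_to_seekUp e hin hid)
              exact seekDown_append_ne e hmk
            | none => exact seekDown_append_none e
          rw [this]

theorem bMoveUp_step {d : List Int} :
    ∀ (m : Nat) (k x k1 : Int), (k - k1).toNat ≤ m → seekDown d (k - 1) = some k1 → 0 < x →
      bMoveUp d k x = bMoveUp d k1 (x - 1) := by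
  intro m
  induction m with
  | zero =>
    intro k x k1 hm h hx
    have := seekDown_some h
    omega
  | succ m ih =>
    intro k x k1 hm h hx
    have hch := seekDown_some h
    rw [bMoveUp, dif_pos hx]
    by_cases he : k - 1 = k1
    · have hnc : ¬ PySem.Set.contains d (k - 1) = true := by
        simp only [PySem.Set.contains, List.contains_iff_mem, he]
        exact hch.2.2.1
      rw [dif_neg hnc, he]
    · have hmem : k - 1 ∈ d := hch.2.2.2 (k - 1) (by omega) (by omega)
      have hc : PySem.Set.contains d (k - 1) = true := by
        simp only [PySem.Set.contains, List.contains_iff_mem]; exact hmem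
      rw [dif_pos hc]
      have h' : seekDown d (k - 1 - 1) = some k1 :=
        seekDown_of (by omega) hch.2.1 hch.2.2.1
          (fun t ht1 ht2 => hch.2.2.2 t ht1 (by omega))
      exact ih (k - 1) x k1 (by omega) h' hx

theorem bMoveDown_step {n : Int} {d : List Int} :
    ∀ (m : Nat) (k x k1 : Int), (k1 - k).toNat ≤ m → seekUp d n (k + 1) = some k1 → 0 < x →
      bMoveDown d k x = bMoveDown d k1 (x - 1) := by
  intro m
  induction m with
  | zero =>
    intro k x k1 hm h hx
    have := seekUp_some h
    omega
  | succ m ih =>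
    intro k x k1 hm h hx
    have hch := seekUp_some h
    rw [bMoveDown, dif_pos hx]
    by_cases he : k + 1 = k1
    · have hnc : ¬ PySem.Set.contains d (k + 1) = true := by
        simp only [PySem.Set.contains, List.contains_iff_mem, he]
        exact hch.2.2.1
      rw [dif_neg hnc, he]
    · have hmem : k + 1 ∈ d := hch.2.2.2 (k + 1) (by omega) (by omega)
      have hc : PySem.Set.contains d (k + 1) = true := by
        simp only [PySem.Set.contains, List.contains_iff_mem]; exact hmem
      rw [dif_pos hc]
      have h' : seekUp d n (k + 1 + 1) = some k1 :=
        seekUp_of (by omega) hch.2.1 hch.2.2.1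
          (fun t ht1 ht2 => hch.2.2.2 t (by omega) ht2)
      exact ih (k + 1) x k1 (by omega) h' hx

theorem bScanUp_eq {n : Int} {d : List Int} :
    ∀ (m : Nat) (j r : Int), (r - j).toNat ≤ m → seekUp d n j = some r → bScanUp n d j = r := by
  intro m
  induction m with
  | zero =>
    intro j r hm h
    have hch := seekUp_some h
    have hjr : j = r := by omega
    subst hjr
    rw [bScanUp, dif_neg]
    simp only [not_and]
    intro _
    simp only [PySem.Set.contains, List.contains_iff_mem]
    simpa using hch.2.2.1
  | succ m ih =>
    intro j r hm h
    have hch := seekUp_some h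
    by_cases hjr : j = r
    · subst hjr
      rw [bScanUp, dif_neg]
      simp only [not_and]
      intro _
      simp only [PySem.Set.contains, List.contains_iff_mem]
      simpa using hch.2.2.1
    · have hmem : j ∈ d := hch.2.2.2 j le_rfl (by omega)
      rw [bScanUp, dif_pos ⟨by omega, by
        simp only [PySem.Set.contains, List.contains_iff_mem]; exact hmem⟩]
      have h' : seekUp d n (j + 1) = some r :=
        seekUp_of (by omega) hch.2.1 hch.2.2.1 (fun t ht1 ht2 => hch.2.2.2 t (by omega) ht2)
      exact ih (j + 1) r (by omega) h' 

theorem bScanUp_ge {n : Int} {d : List Int} :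
    ∀ (m : Nat) (j : Int), (n - j).toNat ≤ m → seekUp d n j = none → n ≤ bScanUp n d j := by
  intro m
  induction m with
  | zero =>
    intro j hm h
    rw [bScanUp, dif_neg]
    · omega
    · simp only [not_and]
      intro hj
      omega
  | succ m ih =>
    intro j hm h
    by_cases hj : j < n
    · have hmem : j ∈ d := seekUp_none h j le_rfl hj
      rw [bScanUp, dif_pos ⟨hj, by
        simp only [PySem.Set.contains, List.contains_iff_mem]; exact hmem⟩]
      exact ih (j + 1) (by omega)
        (seekUp_none_of (fun t ht1 ht2 => seekUp_none h t (by omega) ht2))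
    · rw [bScanUp, dif_neg (by simp only [not_and]; intro hc; omega)]
      omega

theorem bScanDown_eq {d : List Int} :
    ∀ (m : Nat) (j r : Int), (j - r).toNat ≤ m → seekDown d j = some r → bScanDown d j = r := by
  intro m
  induction m with
  | zero =>
    intro j r hm h
    have hch := seekDown_some h
    have hjr : j = r := by omega
    subst hjr
    rw [bScanDown, dif_neg]
    simp only [not_and]
    intro _
    simp only [PySem.Set.contains, List.contains_iff_mem]
    simpa using hch.2.2.1
  | succ m ih =>
    intro j r hm h
    have hch := seekDown_some h
    by_cases hjr : j = r
    · subst hjr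
      rw [bScanDown, dif_neg]
      simp only [not_and]
      intro _
      simp only [PySem.Set.contains, List.contains_iff_mem]
      simpa using hch.2.2.1
    · have hmem : j ∈ d := hch.2.2.2 j (by omega) le_rfl
      rw [bScanDown, dif_pos ⟨by omega, by
        simp only [PySem.Set.contains, List.contains_iff_mem]; exact hmem⟩]
      have h' : seekDown d (j - 1) = some r :=
        seekDown_of (by omega) hch.2.1 hch.2.2.1 (fun t ht1 ht2 => hch.2.2.2 t ht1 (by omega))
      exact ih (j - 1) r (by omega) h' 

theorem move_sim_up {n : Int} {nxt prv : List (Option Int)} {d : List Int}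
    (hInv : LLInv n nxt prv d) :
    ∀ (m : Nat) (x : Int), x.toNat ≤ m → ∀ k k', 0 ≤ k → k < n → k ∉ d →
      chkMove n d 'U' k x = some k' →
      aMove prv k x = some k' ∧ bMoveUp d k x = k' ∧ 0 ≤ k' ∧ k' < n ∧ k' ∉ d := by
  intro m
  induction m with
  | zero =>
    intro x hx k k' hk0 hkn hkd hcm
    have hxle : ¬ 0 < x := by omega
    rw [chkMove_unfold, if_neg hxle] at hcm
    simp only [Option.some.injEq] at hcm
    subst hcm
    rw [aMove, dif_neg hxle, bMoveUp, dif_neg hxle]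
    exact ⟨rfl, rfl, hk0, hkn, hkd⟩
  | succ m ih =>
    intro x hx k k' hk0 hkn hkd hcm
    by_cases hpos : 0 < x
    · rw [chkMove_unfold, if_pos hpos] at hcm
      rw [if_pos rfl] at hcm
      cases hsd : seekDown d (k - 1) with
      | none => rw [hsd] at hcm; simp at hcm
      | some k1 =>
        rw [hsd] at hcm
        simp only at hcm
        have hch := seekDown_some hsd
        obtain ⟨hA, hB, hprops⟩ := ih (x - 1) (by omega) k1 k' hch.2.1 (by omega) hch.2.2.1 hcm
        refine ⟨?_, ?_, hprops⟩
        · rw [aMove, dif_pos hpos]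
          have hget : PySem.List.pyGet? prv k = some (some k1) := by
            rw [PySem.List.pyGet?_of_nonneg _ hk0]
            obtain ⟨_, _, _, _, hptr⟩ := hInv
            rw [(hptr k hk0 hkn).2, ctx_not_mem hkd, hsd]
          rw [hget]
          exact hA
        · rw [bMoveUp_step (k - k1).toNat k x k1 le_rfl hsd hpos]
          exact hB
    · rw [chkMove_unfold, if_neg hpos] at hcm
      simp only [Option.some.injEq] at hcm
      subst hcm
      rw [aMove, dif_neg hpos, bMoveUp, dif_neg hpos]
      exact ⟨rfl, rfl, hk0, hkn, hkd⟩

theorem move_sim_down {n : Int} {nxt prv : List (Option Int)} {d : List Int}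
    (hInv : LLInv n nxt prv d) :
    ∀ (m : Nat) (x : Int), x.toNat ≤ m → ∀ k k', 0 ≤ k → k < n → k ∉ d →
      ∀ (c : Char), ¬ c = 'U' → chkMove n d c k x = some k' →
      aMove nxt k x = some k' ∧ bMoveDown d k x = k' ∧ 0 ≤ k' ∧ k' < n ∧ k' ∉ d := by
  intro m
  induction m with
  | zero =>
    intro x hx k k' hk0 hkn hkd c hc hcm
    have hxle : ¬ 0 < x := by omega
    rw [chkMove_unfold, if_neg hxle] at hcm
    simp only [Option.some.injEq] at hcm
    subst hcm
    rw [aMove, dif_neg hxle, bMoveDown, dif_neg hxle]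
    exact ⟨rfl, rfl, hk0, hkn, hkd⟩
  | succ m ih =>
    intro x hx k k' hk0 hkn hkd c hc hcm
    by_cases hpos : 0 < x
    · rw [chkMove_unfold, if_pos hpos] at hcm
      rw [if_neg hc] at hcm
      cases hsu : seekUp d n (k + 1) with
      | none => rw [hsu] at hcm; simp at hcm
      | some k1 =>
        rw [hsu] at hcm
        simp only at hcm
        have hch := seekUp_some hsu
        obtain ⟨hA, hB, hprops⟩ := ih (x - 1) (by omega) k1 k' (by omega) hch.2.1 hch.2.2.1 c hc hcm
        refine ⟨?_, ?_, hprops⟩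
        · rw [aMove, dif_pos hpos]
          have hget : PySem.List.pyGet? nxt k = some (some k1) := by
            rw [PySem.List.pyGet?_of_nonneg _ hk0]
            obtain ⟨_, _, _, _, hptr⟩ := hInv
            rw [(hptr k hk0 hkn).1, ctx_not_mem hkd, hsu]
          rw [hget]
          exact hA
        · rw [bMoveDown_step (k1 - k).toNat k x k1 le_rfl hsu hpos]
          exact hB
    · rw [chkMove_unfold, if_neg hpos] at hcm
      simp only [Option.some.injEq] at hcm
      subst hcm
      rw [aMove, dif_neg hpos, bMoveDown, dif_neg hpos]
      exact ⟨rfl, rfl, hk0, hkn, hkd⟩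

theorem step_sim {n : Int} (hn : 2 ≤ n) {nxt prv : List (Option Int)} {d : List Int}
    {k : Int} {cmd : String} {rest : List String}
    (hInv : LLInv n nxt prv d) (hv : pvValid n k d (cmd :: rest) = true) :
    ∃ nxt' prv' d' k',
      aStep ⟨nxt, prv, d, k⟩ cmd = some ⟨nxt', prv', d', k'⟩ ∧ LLInv n nxt' prv' d' ∧
      bStep n (d, d, k) cmd = some (d', d', k') ∧ pvValid n k' d' rest = true := by
  simp only [pvValid] at hv
  cases hc0 : PySem.Str.pyGet? cmd 0 with
  | none => rw [hc0] at hv; simp at hv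
  | some c =>
  rw [hc0] at hv
  simp only at hv
  have hc0' : PySem.List.pyGet? cmd.toList 0 = some c := by
    simpa [PySem.Str.pyGet?, PySem.Chars.pyGet?] using hc0
  by_cases hUD : c = 'U' ∨ c = 'D'
  · rw [if_pos hUD] at hv
    cases hsp : PySem.Str.split? cmd " " with
    | none => rw [hsp] at hv; simp at hv
    | some parts =>
    rw [hsp] at hv
    simp only at hv
    cases hw : PySem.List.pyGet? parts 1 with
    | none => rw [hw] at hv; simp at hv
    | some w =>
    rw [hw] at hv
    simp only at hv
    cases hx : PySem.Int.ofStr? w with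
    | none => rw [hx] at hv; simp at hv
    | some x =>
    rw [hx] at hv
    simp only at hv
    by_cases hpos : 0 < x
    · rw [if_pos hpos] at hv
      by_cases hk : 0 ≤ k ∧ k < n ∧ k ∉ d
      case neg => rw [if_neg hk] at hv; simp at hv
      rw [if_pos hk] at hv
      cases hcm : chkMove n d c k x with
      | none => rw [hcm] at hv; simp at hv
      | some k1 =>
      rw [hcm] at hv
      simp only at hv
      rcases hUD with hU | hD
      · subst hU
        obtain ⟨HA, HB, hk1⟩ :=
          move_sim_up hInv x.toNat x le_rfl k k1 hk.1 hk.2.1 hk.2.2 hcm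
        refine ⟨nxt, prv, d, k1, ?_, hInv, ?_, hv⟩
        · simp [aStep, hc0, hc0', hsp, hw, hx, HA]
        · simp [bStep, hc0, hc0', hsp, hw, hx, HB]
      · subst hD
        obtain ⟨HA, HB, hk1⟩ :=
          move_sim_down hInv x.toNat x le_rfl k k1 hk.1 hk.2.1 hk.2.2 'D' (by decide) hcm
        refine ⟨nxt, prv, d, k1, ?_, hInv, ?_, hv⟩
        · simp [aStep, hc0, hc0', hsp, hw, hx, HA]
        · simp [bStep, hc0, hc0', hsp, hw, hx, HB]
    · rw [if_neg hpos] at hv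
      have hA0 : ∀ tbl : List (Option Int), aMove tbl k x = some k := by
        intro tbl; rw [aMove, dif_neg hpos]
      rcases hUD with hU | hD
      · subst hU
        have hB0 : bMoveUp d k x = k := by rw [bMoveUp, dif_neg hpos]
        refine ⟨nxt, prv, d, k, ?_, hInv, ?_, hv⟩
        · simp [aStep, hc0, hc0', hsp, hw, hx, hA0]
        · simp [bStep, hc0, hc0', hsp, hw, hx, hB0]
      · subst hD
        have hB0 : bMoveDown d k x = k := by rw [bMoveDown, dif_neg hpos]
        refine ⟨nxt, prv, d, k, ?_, hInv, ?_, hv⟩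
        · simp [aStep, hc0, hc0', hsp, hw, hx, hA0]
        · simp [bStep, hc0, hc0', hsp, hw, hx, hB0]
  · rw [if_neg hUD] at hv
    by_cases hC : c = 'C'
    · subst hC
      rw [if_pos rfl] at hv
      by_cases hk : 0 ≤ k ∧ k < n ∧ k ∉ d
      case neg => rw [if_neg hk] at hv; simp at hv
      rw [if_pos hk] at hv
      have hptrk := hInv.2.2.2.2 k hk.1 hk.2.1
      have hgn : PySem.List.pyGet? nxt k = some (seekUp d n (k + 1)) := by
        rw [PySem.List.pyGet?_of_nonneg _ hk.1, hptrk.1, ctx_not_mem hk.2.2]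
      have hgp : PySem.List.pyGet? prv k = some (seekDown d (k - 1)) := by
        rw [PySem.List.pyGet?_of_nonneg _ hk.1, hptrk.2, ctx_not_mem hk.2.2]
      have hLL := llinv_C hInv hk.1 hk.2.1 hk.2.2
      have hadd : PySem.Set.add d k = d ++ [k] := by
        simp [PySem.Set.add, PySem.Set.contains, hk.2.2]
      cases hsu : seekUp d n (k + 1) with
      | some r =>
        rw [hsu] at hv hLL
        simp only at hv
        have hchr := seekUp_some hsu
        have hbu : bScanUp n (d ++ [k]) (k + 1) = r :=
          bScanUp_eq (r - (k + 1)).toNat (k + 1) r le_rfl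
            (by rw [seekUp_append_lt (by omega)]; exact hsu)
        have hset2 : PySem.List.pySet? prv r (seekDown d (k - 1)) =
            some (prv.set r.toNat (seekDown d (k - 1))) := by
          rw [show r = ((r.toNat : Nat) : Int) by omega]
          exact PySem.List.pySet?_natCast _ _ _ (by rw [hInv.2.1]; omega)
        cases hsd : seekDown d (k - 1) with
        | some p0 =>
          rw [hsd] at hLL hset2
          have hchp := seekDown_some hsd
          have hset1 : PySem.List.pySet? nxt p0 (some r) = some (nxt.set p0.toNat (some r)) := by
            rw [show p0 = ((p0.toNat : Nat) : Int) by omega]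
            exact PySem.List.pySet?_natCast _ _ _ (by rw [hInv.1]; omega)
          refine ⟨_, _, _, r, ?_, hLL, ?_, hv⟩
          · simp [aStep, hc0, hc0', hgn, hgp, hsu, hsd, hset1, hset2, oset]
          · simp [bStep, hc0, hc0', hadd, hbu, hchr.2.1]
        | none =>
          rw [hsd] at hLL hset2
          refine ⟨_, _, _, r, ?_, hLL, ?_, hv⟩
          · simp [aStep, hc0, hc0', hgn, hgp, hsu, hsd, hset2, oset]
          · simp [bStep, hc0, hc0', hadd, hbu, hchr.2.1]
      | none =>
        rw [hsu] at hv hLL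
        cases hsd : seekDown d (k - 1) with
        | none => rw [hsd] at hv; simp at hv
        | some p0 =>
          rw [hsd] at hv hLL
          simp only at hv
          have hchp := seekDown_some hsd
          have hset1 : PySem.List.pySet? nxt p0 none = some (nxt.set p0.toNat none) := by
            rw [show p0 = ((p0.toNat : Nat) : Int) by omega]
            exact PySem.List.pySet?_natCast _ _ _ (by rw [hInv.1]; omega)
          have hge : n ≤ bScanUp n (d ++ [k]) (k + 1) :=
            bScanUp_ge (n - (k + 1)).toNat (k + 1) le_rfl
              (by rw [seekUp_append_lt (by omega)]; exact hsu)
          have hbd : bScanDown (d ++ [k]) (k - 1) = p0 :=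
            bScanDown_eq ((k - 1) - p0).toNat (k - 1) p0 le_rfl
              (by rw [seekDown_append_gt (by omega)]; exact hsd)
          have hnlt : ¬ bScanUp n (d ++ [k]) (k + 1) < n := by omega
          refine ⟨_, _, _, p0, ?_, hLL, ?_, hv⟩
          · simp [aStep, hc0, hc0', hgn, hgp, hsu, hsd, hset1, oset]
          · simp [bStep, hc0, hc0', hadd, hnlt, hbd]
    · by_cases hZ : c = 'Z'
      · subst hZ
        rw [if_neg hC, if_pos rfl] at hv
        cases hlast : d.getLast? with
        | none => rw [hlast] at hv; simp at hv
        | some last =>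
        rw [hlast] at hv
        simp only at hv
        obtain ⟨d0, rfl⟩ := List.getLast?_eq_some_iff.mp hlast
        rw [List.dropLast_concat] at hv
        have hnd := hInv.2.2.1
        have hl0 : last ∉ d0 := by
          rw [← List.concat_eq_append, List.nodup_concat] at hnd; exact hnd.1
        have hrange := hInv.2.2.2.1 last (List.mem_append_right _ (by simp))
        have hptrl := hInv.2.2.2.2 last hrange.1 hrange.2
        have hctxl : ctx (d0 ++ [last]) last = d0 := ctx_append_self hl0
        have hgn : PySem.List.pyGet? nxt last = some (seekUp d0 n (last + 1)) := by
          rw [PySem.List.pyGet?_of_nonneg _ hrange.1, hptrl.1, hctxl]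
        have hgp : PySem.List.pyGet? prv last = some (seekDown d0 (last - 1)) := by
          rw [PySem.List.pyGet?_of_nonneg _ hrange.1, hptrl.2, hctxl]
        have hLL := llinv_Z hInv
        have hpop : PySem.List.pop? (d0 ++ [last]) = some (last, d0) :=
          PySem.List.pop?_last d0 last
        have hdisc : PySem.Set.discard (d0 ++ [last]) last = d0 := by
          simp [PySem.Set.discard, List.filter_append]
          exact fun a ha hc => hl0 (hc ▸ ha)
        cases hsu : seekUp d0 n (last + 1) with
        | some r =>
          rw [hsu] at hLL
          have hchr := seekUp_some hsu
          have hset2 : PySem.List.pySet? prv r (some last) = some (prv.set r.toNat (some last)) := by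
            rw [show r = ((r.toNat : Nat) : Int) by omega]
            exact PySem.List.pySet?_natCast _ _ _ (by rw [hInv.2.1]; omega)
          cases hsd : seekDown d0 (last - 1) with
          | some p0 =>
            rw [hsd] at hLL
            have hchp := seekDown_some hsd
            have hset1 : PySem.List.pySet? nxt p0 (some last) =
                some (nxt.set p0.toNat (some last)) := by
              rw [show p0 = ((p0.toNat : Nat) : Int) by omega]
              exact PySem.List.pySet?_natCast _ _ _ (by rw [hInv.1]; omega)
            refine ⟨_, _, _, k, ?_, hLL, ?_, hv⟩
            · simp [aStep, hc0, hc0', hlast, hgn, hgp, hsu, hsd, hset1, hset2, oset]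
            · simp [bStep, hc0, hc0', hpop, hdisc]
          | none =>
            rw [hsd] at hLL
            refine ⟨_, _, _, k, ?_, hLL, ?_, hv⟩
            · simp [aStep, hc0, hc0', hlast, hgn, hgp, hsu, hsd, hset2, oset]
            · simp [bStep, hc0, hc0', hpop, hdisc]
        | none =>
          rw [hsu] at hLL
          cases hsd : seekDown d0 (last - 1) with
          | some p0 =>
            rw [hsd] at hLL
            have hchp := seekDown_some hsd
            have hset1 : PySem.List.pySet? nxt p0 (some last) =
                some (nxt.set p0.toNat (some last)) := by
              rw [show p0 = ((p0.toNat : Nat) : Int) by omega]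
              exact PySem.List.pySet?_natCast _ _ _ (by rw [hInv.1]; omega)
            refine ⟨_, _, _, k, ?_, hLL, ?_, hv⟩
            · simp [aStep, hc0, hc0', hlast, hgn, hgp, hsu, hsd, hset1, oset]
            · simp [bStep, hc0, hc0', hpop, hdisc]
          | none =>
            rw [hsd] at hLL
            refine ⟨_, _, _, k, ?_, hLL, ?_, hv⟩
            · simp [aStep, hc0, hc0', hlast, hgn, hgp, hsu, hsd, oset]
            · simp [bStep, hc0, hc0', hpop, hdisc]
      · rw [if_neg hC, if_neg hZ] at hv
        refine ⟨nxt, prv, d, k, ?_, hInv, ?_, hv⟩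
        · simp [aStep, hc0, hc0', hUD, hC, hZ]
        · have hU : ¬ c = 'U' := fun h => hUD (Or.inl h)
          have hD : ¬ c = 'D' := fun h => hUD (Or.inr h)
          simp [bStep, hc0, hc0', hU, hD, hC, hZ]

theorem loop_sim {n : Int} (hn : 2 ≤ n) :
    ∀ (cmds : List String) (nxt prv : List (Option Int)) (d : List Int) (k : Int),
      LLInv n nxt prv d → pvValid n k d cmds = true →
      ∃ nxt' prv' d' k',
        aLoop cmds (some ⟨nxt, prv, d, k⟩) = some ⟨nxt', prv', d', k'⟩ ∧ LLInv n nxt' prv' d' ∧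
        bLoop n cmds (some (d, d, k)) = some (d', d', k') := by
  intro cmds
  induction cmds with
  | nil =>
    intro nxt prv d k hInv hv
    exact ⟨nxt, prv, d, k, rfl, hInv, rfl⟩
  | cons cmd rest ih =>
    intro nxt prv d k hInv hv
    obtain ⟨nxt1, prv1, d1, k1, hA, hI1, hB, hv1⟩ := step_sim hn hInv hv
    obtain ⟨nxt', prv', d', k', hA', hI', hB'⟩ := ih nxt1 prv1 d1 k1 hI1 hv1
    refine ⟨nxt', prv', d', k', ?_, hI', ?_⟩
    · simpa [aLoop, List.foldl_cons, hA] using hA'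
    · simpa [bLoop, List.foldl_cons, hB] using hB' 

theorem render_eq {n : Int} {d : List Int} (hd : ∀ e ∈ d, 0 ≤ e ∧ e < n) :
    (d.foldl (fun a? e => a?.bind (fun a => PySem.List.pySet? a e "X"))
      (some ((PySem.List.pyRange 0 n).map (fun _ => "O")))) =
    some ((PySem.List.pyRange 0 n).map
      (fun i => if PySem.Set.contains d i then "X" else "O")) := by
  have hlen : ((PySem.List.pyRange 0 n).map (fun _ => ("O" : String))).length = n.toNat := by
    simp [PySem.List.length_pyRange_one]
  have h1 : ∀ (l : List Int) (acc : List String), (∀ e ∈ l, 0 ≤ e ∧ e.toNat < acc.length) →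
      l.foldl (fun a? e => a?.bind (fun a => PySem.List.pySet? a e "X")) (some acc) =
      some (l.foldl (fun a e => a.set e.toNat "X") acc) := by
    intro l
    induction l with
    | nil => intro acc h; rfl
    | cons e l ih =>
      intro acc h
      have he := h e (List.mem_cons_self ..)
      have hset : PySem.List.pySet? acc e "X" = some (acc.set e.toNat "X") := by
        rw [show e = ((e.toNat : Nat) : Int) by omega]
        exact PySem.List.pySet?_natCast _ _ _ (by simpa using he.2)
      simp only [List.foldl_cons, Option.bind_some, hset]
      exact ih _ (fun a ha => by
        have := h a (List.mem_cons_of_mem _ ha)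
        simpa [List.length_set] using this)
  rw [h1 d _ (fun e he => ⟨(hd e he).1, by rw [hlen]; have := hd e he; omega⟩)]
  congr 1
  apply List.ext_getElem?
  intro j
  rw [foldl_set_getElem? (fun _ => "X") d _
    (fun e he => ⟨(hd e he).1, by rw [hlen]; have := hd e he; omega⟩) j]
  by_cases hj : j < n.toNat
  · have hrj : (PySem.List.pyRange 0 n)[j]? = some ((j : Int)) := by
      rw [PySem.List.pyRange_one, List.getElem?_map, List.getElem?_range (by omega)]
      simp
    rw [List.getElem?_map, List.getElem?_map, hrj]
    by_cases hm : (j : Int) ∈ d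
    · rw [if_pos hm]
      simp [PySem.Set.contains, List.contains_iff_mem, hm]
    · rw [if_neg hm]
      simp [PySem.Set.contains, List.contains_iff_mem, hm]
  · have hrj : (PySem.List.pyRange 0 n)[j]? = none := by
      rw [PySem.List.pyRange_one, List.getElem?_map]
      rw [List.getElem?_eq_none (by simpa using by omega)]
      rfl
    have hm : ¬ (j : Int) ∈ d := fun hc => by have := hd _ hc; omega
    rw [List.getElem?_map, List.getElem?_map, hrj, if_neg hm]
    rfl

-- ===== VERDICT (by name: the statement is the Claim_ definition above) =====
theorem solution_spec : Claim_equal_solution := by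
  intro n k cmds hdom hpre
  obtain ⟨hn, hv⟩ := hpre
  unfold Spec_solution
  obtain ⟨nxt', prv', d', k', hA, hI', hB⟩ :=
    loop_sim hn cmds (aInit n).2 (aInit n).1 [] k (llinv_init hn) hv
  have hB' : bLoop n cmds (some (PySem.Set.empty, ([] : List Int), k)) =
      some (d', d', k') := hB
  simp only [solution, solution_alt, if_pos hn]
  rw [hA, hB']
  simp only
  rw [render_eq hI'.2.2.2.1]
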